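-- pv_equiv track=rewrite | github.com/maxHyeon/acmicpcPython | acmicpc/1316.py3.py | checkGroupWord
-- ===== SOURCE A (Python) =====
-- def checkGroupWord(word):
-- 	tmpChr = set();
-- 	for i in range(1,len(word)):
-- 		if (word[i] != word[i-1]):
-- 			tmpChr.add(word[i-1]);
-- 		if (word[i] in tmpChr):
-- 			return 0;
-- 	return 1;
-- ===== SOURCE B (Python) =====
-- def checkGroupWord(word):
--     # collapse each maximal run of equal letters to one letter
--     collapsed = []
--     for ch in word:
--         if not collapsed or collapsed[-1] != ch:
--             collapsed.append(ch)
--     # group word iff no letter starts two different runs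
--     return 1 if len(set(collapsed)) == len(collapsed) else 0
-- ===== Notes on version B (the rewrite author's own statement) =====
-- stated objective: simpler
-- what changed: B collapses the word to one letter per maximal run and then checks that the collapsed sequence has no repeated letter, instead of A's single short-circuiting scan that maintains a set of finished letters.
import Mathlib
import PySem

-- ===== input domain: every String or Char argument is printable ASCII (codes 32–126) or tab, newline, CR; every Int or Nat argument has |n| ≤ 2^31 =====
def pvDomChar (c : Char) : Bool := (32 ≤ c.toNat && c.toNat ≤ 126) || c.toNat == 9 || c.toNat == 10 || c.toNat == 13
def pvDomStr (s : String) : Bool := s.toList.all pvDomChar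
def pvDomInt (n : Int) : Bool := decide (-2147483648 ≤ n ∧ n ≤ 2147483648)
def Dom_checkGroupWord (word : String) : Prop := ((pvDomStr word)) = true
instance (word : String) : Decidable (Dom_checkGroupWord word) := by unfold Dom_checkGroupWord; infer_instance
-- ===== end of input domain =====

-- B collapses the word to one letter per maximal run, then checks that the collapsed
-- sequence has no repeated letter (objective: simpler two-phase build-then-check).

-- ===== PORT A =====
-- the for-loop over i in range(1, len(word)): state = tmpChr, remaining pairs (word[i-1], word[i])
def checkGroupWordLoop (tmpChr : PySem.Set Char) : List Char → Int
  | p :: c :: rest =>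
    let tmpChr' := if c ≠ p then PySem.Set.add tmpChr p else tmpChr
    if c ∈ tmpChr' then 0 else checkGroupWordLoop tmpChr' (c :: rest)
  | _ => 1

def checkGroupWord (word : String) : Int :=
  checkGroupWordLoop PySem.Set.empty word.toList

-- ===== PORT B =====
-- the collapsing loop of Source B: `last` tracks collapsed[-1]
def collapseGo (last : Char) : List Char → List Char
  | [] => []
  | c :: rest => if c = last then collapseGo last rest else c :: collapseGo c rest

def collapse : List Char → List Char
  | [] => []
  | c :: rest => c :: collapseGo c rest

def checkGroupWord_alt (word : String) : Int :=
  let collapsed := collapse word.toList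
  if (PySem.Set.ofList collapsed).length = collapsed.length then 1 else 0

-- ===== PRECONDITION & SPEC =====
def Spec_checkGroupWord (word : String) (out : Int) : Prop := out = checkGroupWord_alt word
instance (word : String) (out : Int) : Decidable (Spec_checkGroupWord word out) := by unfold Spec_checkGroupWord; infer_instance

-- ===== CLAIM (what is proved, stated in full; the proofs are below) =====
def Claim_equal_checkGroupWord : Prop := ∀ (word : String), Dom_checkGroupWord word → Spec_checkGroupWord word (checkGroupWord word)

-- ===== LEMMAS AND PROOFS =====

-- len(set(l)) = len(l) iff l has no duplicates
theorem length_ofList_lt_of_not_nodup (l : List Char) (h : ¬ l.Nodup) :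
    (PySem.Set.ofList l).length < l.length := by
  induction l with
  | nil => exact absurd List.nodup_nil h
  | cons x xs ih =>
    rw [PySem.Set.ofList_cons]
    simp only [List.nodup_cons, not_and] at h
    by_cases hx : x ∈ xs
    · have h1 : ((PySem.Set.ofList xs).discard x).length < (PySem.Set.ofList xs).length := by
        unfold PySem.Set.discard
        rw [List.length_filter_lt_length_iff_exists]
        exact ⟨x, (PySem.Set.mem_ofList xs x).mpr hx, by simp⟩
      have h2 := PySem.Set.length_ofList_le xs
      simp only [List.length_cons]
      omega
    · have hnd := h hx
      have h1 : ((PySem.Set.ofList xs).discard x).length ≤ (PySem.Set.ofList xs).length :=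
        List.length_filter_le _ _
      have h2 := ih hnd
      simp only [List.length_cons]
      omega

theorem ofList_length_eq_iff_nodup (l : List Char) :
    (PySem.Set.ofList l).length = l.length ↔ l.Nodup := by
  constructor
  · intro h
    by_contra hnd
    exact absurd h (Nat.ne_of_lt (length_ofList_lt_of_not_nodup l hnd))
  · intro h
    rw [PySem.Set.ofList_eq_self_of_nodup l h]

-- invariant characterisation of A's loop
theorem checkGroupWordLoop_eq (l : List Char) :
    ∀ (p : Char) (tmp : PySem.Set Char), p ∉ tmp →
      checkGroupWordLoop tmp (p :: l) =
        if (p :: collapseGo p l).Nodup ∧ ∀ c ∈ collapseGo p l, c ∉ tmp then 1 else 0 := by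
  induction l with
  | nil =>
    intro p tmp _
    simp [checkGroupWordLoop, collapseGo]
  | cons c rest ih =>
    intro p tmp hp
    by_cases hcp : c = p
    · subst hcp
      have : checkGroupWordLoop tmp (c :: c :: rest) = checkGroupWordLoop tmp (c :: rest) := by
        simp [checkGroupWordLoop, hp]
      rw [this, ih c tmp hp]
      simp [collapseGo]
    · have hne : c ≠ p := hcp
      by_cases hct : c ∈ tmp
      · have hL : checkGroupWordLoop tmp (p :: c :: rest) = 0 := by
          simp [checkGroupWordLoop, hne, PySem.Set.mem_add, hct]
        have hbad : ¬ ((p :: collapseGo p (c :: rest)).Nodup ∧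
            ∀ x ∈ collapseGo p (c :: rest), x ∉ tmp) := by
          simp only [collapseGo, if_neg hcp]
          intro ⟨_, hall⟩
          exact hall c (List.mem_cons_self) hct
        rw [hL, if_neg hbad]
      · have hcadd : c ∉ PySem.Set.add tmp p := by
          rw [PySem.Set.mem_add]
          rintro (h | h)
          · exact hct h
          · exact hne h
        have hL : checkGroupWordLoop tmp (p :: c :: rest) =
            checkGroupWordLoop (PySem.Set.add tmp p) (c :: rest) := by
          simp only [checkGroupWordLoop]
          rw [if_pos hne, if_neg hcadd]
        rw [hL, ih c (PySem.Set.add tmp p) hcadd]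
        have hiff : ((c :: collapseGo c rest).Nodup ∧
              ∀ x ∈ collapseGo c rest, x ∉ PySem.Set.add tmp p) ↔
            ((p :: collapseGo p (c :: rest)).Nodup ∧
              ∀ x ∈ collapseGo p (c :: rest), x ∉ tmp) := by
          simp only [collapseGo, if_neg hcp, List.nodup_cons,
            List.mem_cons, PySem.Set.mem_add, not_or]
          constructor
          · rintro ⟨⟨hcn, hnd⟩, hall⟩
            exact ⟨⟨⟨fun h => hne h.symm, fun h => (hall _ h).2 rfl⟩, hcn, hnd⟩,
              fun x hx => hx.elim (fun h => h ▸ hct) (fun h => (hall x h).1)⟩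
          · rintro ⟨⟨⟨hpc, hpl⟩, hcn, hnd⟩, hall⟩
            exact ⟨⟨hcn, hnd⟩, fun x hx => ⟨hall x (Or.inr hx), fun h => hpl (h ▸ hx)⟩⟩
        rw [if_congr hiff rfl rfl]

-- ===== VERDICT (by name: the statement is the Claim_ definition above) =====
theorem checkGroupWord_spec : Claim_equal_checkGroupWord := by
  intro word _
  unfold Spec_checkGroupWord checkGroupWord checkGroupWord_alt
  cases hw : word.toList with
  | nil => simp [checkGroupWordLoop, collapse, PySem.Set.ofList]
  | cons p l =>
    rw [checkGroupWordLoop_eq l p PySem.Set.empty (by simp [PySem.Set.empty])]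
    simp only [collapse, ofList_length_eq_iff_nodup]
    simp [PySem.Set.empty]
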